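-- pv_equiv track=rewrite | github.com/salzmanlab-admin/SQUICH_Data_Processing | sq_utils.py | expand_degens
-- ===== SOURCE A (Python) =====
-- def degen_seqs():
--     degens = {'A':['A'],'C':['C'],'G':['G'],'T':['T'],
--               'R':['A','G'],'Y':['C','T'],'S':['C','G'],'W':['A','T'],'K':['G','T'],'M':['A','C'],
--               'B':['C','G','T'],'D':['A','G','T'],'H':['A','C','T'],'V':['A','C','G'],
--               'N':['A','C','G','T']}
--
--     return degens
--
-- def expand_degens(seq):
--     degens = degen_seqs()
--
--     def expand_degens_recur(seq,builds=['']):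
--         if not seq:
--             return builds
--
--         h,t = seq[0],seq[1:]
--         builds = [build+degen for degen in degens[h] for build in builds]
--         return expand_degens_recur(t,builds)
--
--     return expand_degens_recur(seq)
-- ===== SOURCE B (Python) =====
-- def expand_degens(seq):
--     # mixed-radix enumeration: expansion i has, at position p, the (i // prod(earlier sizes)) % size_p
--     # option of seq[p]; position 0 varies fastest, matching A's ordering.
--     codes = {'A':'A','C':'C','G':'G','T':'T',
--              'R':'AG','Y':'CT','S':'CG','W':'AT','K':'GT','M':'AC',
--              'B':'CGT','D':'AGT','H':'ACT','V':'ACG','N':'ACGT'}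
--     opts = [codes[c] for c in seq]
--     total = 1
--     for o in opts:
--         total *= len(o)
--     out = []
--     for i in range(total):
--         n, chars = i, []
--         for o in opts:
--             chars.append(o[n % len(o)])
--             n //= len(o)
--         out.append(''.join(chars))
--     return out
-- ===== Notes on version B (the rewrite author's own statement) =====
-- stated objective: alternative
-- what changed: Replaces A's recursive list-of-builds accumulation (rebuilding the whole list of partial strings at every character) by a direct mixed-radix enumeration: compute the total count, then decode each index i into one sequence by repeated mod/div over the per-character option strings, position 0 as the fastest digit.
import Mathlib
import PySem

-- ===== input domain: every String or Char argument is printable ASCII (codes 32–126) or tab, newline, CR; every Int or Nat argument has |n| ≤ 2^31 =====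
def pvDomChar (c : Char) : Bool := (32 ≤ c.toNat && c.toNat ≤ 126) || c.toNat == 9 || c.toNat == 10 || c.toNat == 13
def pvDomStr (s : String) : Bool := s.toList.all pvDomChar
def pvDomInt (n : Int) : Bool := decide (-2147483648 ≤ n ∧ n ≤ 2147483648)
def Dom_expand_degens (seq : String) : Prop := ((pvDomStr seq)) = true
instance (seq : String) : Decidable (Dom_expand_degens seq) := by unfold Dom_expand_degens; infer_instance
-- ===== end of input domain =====

-- B replaces A's recursive accumulation of partial builds by a mixed-radix index
-- enumeration (decode each i < total by mod/div); return values proved equal on Pre_.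

-- ===== PORT A =====
def degen_seqs : PySem.Dict Char (List String) :=
  PySem.Dict.ofList
    [('A', ["A"]), ('C', ["C"]), ('G', ["G"]), ('T', ["T"]),
     ('R', ["A", "G"]), ('Y', ["C", "T"]), ('S', ["C", "G"]), ('W', ["A", "T"]),
     ('K', ["G", "T"]), ('M', ["A", "C"]),
     ('B', ["C", "G", "T"]), ('D', ["A", "G", "T"]), ('H', ["A", "C", "T"]),
     ('V', ["A", "C", "G"]), ('N', ["A", "C", "G", "T"])]

-- degens[h] raises KeyError on a character outside the table; Pre_ excludes those, getD [] is only a totalizer there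
def expand_degens_recur (degens : PySem.Dict Char (List String)) : List Char → List String → List String
  | [], builds => builds
  | h :: t, builds =>
      expand_degens_recur degens t
        ((degens.getD h []).flatMap (fun degen => builds.map (fun build => build ++ degen)))

def expand_degens (seq : String) : List String :=
  expand_degens_recur degen_seqs seq.toList [""]

-- ===== PORT B =====
-- B's dict maps each IUPAC code to the string of its options; ported with the
-- option strings as char lists so that o[n % len(o)] is a list index.
def degen_codes : PySem.Dict Char (List Char) :=
  PySem.Dict.ofList
    [('A', ['A']), ('C', ['C']), ('G', ['G']), ('T', ['T']),
     ('R', ['A','G']), ('Y', ['C','T']), ('S', ['C','G']), ('W', ['A','T']),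
     ('K', ['G','T']), ('M', ['A','C']),
     ('B', ['C','G','T']), ('D', ['A','G','T']), ('H', ['A','C','T']),
     ('V', ['A','C','G']), ('N', ['A','C','G','T'])]

-- the inner loop of B: decode index n digit by digit (o[n % len(o)] then n //= len(o));
-- inside Pre_ every o is nonempty, getD 'A' only totalizes the empty case
def pick_chars : List (List Char) → Nat → List Char
  | [], _ => []
  | o :: rest, n => o.getD (n % o.length) 'A' :: pick_chars rest (n / o.length)

def expand_degens_alt (seq : String) : List String :=
  let opts := seq.toList.map (fun c => degen_codes.getD c [])
  let total := opts.foldl (fun acc o => acc * o.length) 1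
  (List.range total).map (fun i => String.ofList (pick_chars opts i))

-- ===== PRECONDITION & SPEC =====
-- Pre_: every character is an IUPAC code present in the table; elsewhere the Python A raises KeyError.
def Pre_expand_degens (seq : String) : Prop :=
  seq.toList.all (fun c => c ∈ ['A','C','G','T','R','Y','S','W','K','M','B','D','H','V','N']) = true
instance (seq : String) : Decidable (Pre_expand_degens seq) := by unfold Pre_expand_degens; infer_instance
def pvWitness_expand_degens : String := "ANY"

def Spec_expand_degens (seq : String) (out : List String) : Prop := out = expand_degens_alt seq
instance (seq : String) (out : List String) : Decidable (Spec_expand_degens seq out) := by unfold Spec_expand_degens; infer_instance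

-- ===== CLAIM (what is proved, stated in full; the proofs are below) =====
def Claim_equal_expand_degens : Prop := ∀ (seq : String), Dom_expand_degens seq → Pre_expand_degens seq → Spec_expand_degens seq (expand_degens seq)

-- ===== LEMMAS AND PROOFS =====

-- suffix-first characterization of A's result (position 0 varies fastest)
def expA : List Char → List String
  | [] => [""]
  | c :: t => (expA t).flatMap (fun r => (degen_seqs.getD c []).map (fun d => d ++ r))

lemma recur_eq_expA (l : List Char) :
    ∀ (builds : List String),
      expand_degens_recur degen_seqs l builds
        = (expA l).flatMap (fun s => builds.map (fun b => b ++ s)) := by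
  induction l with
  | nil =>
      intro builds
      simp [expand_degens_recur, expA]
  | cons c t ih =>
      intro builds
      simp only [expand_degens_recur, expA, ih]
      simp [List.flatMap_assoc, List.map_flatMap, List.flatMap_map, List.map_map,
            Function.comp_def, String.append_assoc]

def prodLen (opts : List (List Char)) : Nat := (opts.map List.length).prod

lemma foldl_mul_len (opts : List (List Char)) :
    ∀ a : Nat, opts.foldl (fun acc o => acc * o.length) a = a * prodLen opts := by
  induction opts with
  | nil => intro a; simp [prodLen]
  | cons o rest ih => intro a; simp [List.foldl, ih, prodLen, Nat.mul_assoc]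

lemma range_mul_decomp (k : Nat) : ∀ (P : Nat),
    List.range (k * P) = (List.range P).flatMap (fun j => (List.range k).map (fun m => j * k + m)) := by
  intro P
  induction P with
  | zero => simp
  | succ P ih =>
      have : k * (P + 1) = k * P + k := by ring
      rw [this, List.range_add, ih, List.range_succ, List.flatMap_append]
      simp [Nat.mul_comm]

lemma getD_range_len (o : List Char) (d : Char) :
    (List.range o.length).map (fun m => o.getD m d) = o := by
  induction o with
  | nil => simp
  | cons x xs ih =>
      rw [List.length_cons, List.range_succ_eq_map, List.map_cons, List.map_map]
      have h1 : (fun m => (x :: xs).getD m d) ∘ Nat.succ = fun m => xs.getD m d := by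
        funext m; simp [List.getD]
      rw [h1, ih]
      simp [List.getD]

-- B's enumeration satisfies the same suffix-first recursion
lemma pick_range_cons (o : List Char) (rest : List (List Char)) :
    (List.range (prodLen (o :: rest))).map (fun i => pick_chars (o :: rest) i)
      = ((List.range (prodLen rest)).map (fun i => pick_chars rest i)).flatMap
          (fun r => o.map (fun d => d :: r)) := by
  have hP : prodLen (o :: rest) = o.length * prodLen rest := by simp [prodLen]
  rw [hP, range_mul_decomp, List.map_flatMap, List.flatMap_map]
  congr 1
  funext j
  rw [List.map_map]
  simp only [Function.comp_def]
  have hmap : ∀ m ∈ List.range o.length,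
      (fun m => pick_chars (o :: rest) (j * o.length + m)) m
        = (fun m => o.getD m 'A' :: pick_chars rest j) m := by
    intro m hm
    have hmlt : m < o.length := List.mem_range.mp hm
    have hk : 0 < o.length := Nat.lt_of_le_of_lt (Nat.zero_le m) hmlt
    simp only [pick_chars]
    have hmod : (j * o.length + m) % o.length = m := by
      rw [Nat.add_comm, Nat.add_mul_mod_self_right, Nat.mod_eq_of_lt hmlt]
    have hdiv : (j * o.length + m) / o.length = j := by
      rw [Nat.add_comm, Nat.add_mul_div_right _ _ hk, Nat.div_eq_of_lt hmlt, Nat.zero_add]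
    rw [hmod, hdiv]
  rw [List.map_congr_left hmap]
  conv_rhs => rw [← getD_range_len o 'A']
  rw [List.map_map]
  simp [Function.comp_def]

lemma append_ofList (c : Char) (L : List Char) :
    String.ofList [c] ++ String.ofList L = String.ofList (c :: L) := by
  rw [← String.ofList_append]; rfl

-- per valid character, A's one-character option strings are exactly B's option chars
lemma optline (c : Char)
    (hc : c ∈ ['A','C','G','T','R','Y','S','W','K','M','B','D','H','V','N']) (L : List Char) :
    (degen_seqs.getD c []).map (fun d => d ++ String.ofList L)
      = (degen_codes.getD c []).map (fun x => String.ofList (x :: L)) := by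
  have key : degen_seqs.getD c [] = (degen_codes.getD c []).map (fun x => String.ofList [x]) := by
    fin_cases hc <;> decide
  rw [key, List.map_map]
  apply List.map_congr_left
  intro x _
  simp [append_ofList]

lemma expA_eq_pick (l : List Char)
    (h : ∀ c ∈ l, c ∈ ['A','C','G','T','R','Y','S','W','K','M','B','D','H','V','N']) :
    expA l = ((List.range (prodLen (l.map (fun c => degen_codes.getD c [])))).map
                (fun i => pick_chars (l.map (fun c => degen_codes.getD c [])) i)).map String.ofList := by
  induction l with
  | nil =>
      simp [expA, prodLen, pick_chars]
  | cons c t ih =>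
      have hc : c ∈ ['A','C','G','T','R','Y','S','W','K','M','B','D','H','V','N'] :=
        h c (List.mem_cons_self ..)
      have ht : ∀ x ∈ t, x ∈ ['A','C','G','T','R','Y','S','W','K','M','B','D','H','V','N'] :=
        fun x hx => h x (List.mem_cons_of_mem _ hx)
      rw [List.map_cons]
      rw [pick_range_cons, List.map_flatMap]
      simp only [expA, ih ht, List.flatMap_map]
      congr 1
      funext r
      rw [List.map_map]
      simpa [Function.comp_def] using optline c hc (pick_chars (t.map (fun c => degen_codes.getD c [])) r)

-- ===== VERDICT (by name: the statement is the Claim_ definition above) =====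
theorem expand_degens_spec : Claim_equal_expand_degens := by
  intro seq _ hpre
  unfold Spec_expand_degens expand_degens expand_degens_alt
  rw [recur_eq_expA]
  simp only [foldl_mul_len, Nat.one_mul]
  have h : ∀ c ∈ seq.toList, c ∈ ['A','C','G','T','R','Y','S','W','K','M','B','D','H','V','N'] := by
    intro c hc
    have := List.all_eq_true.mp hpre c hc
    simpa using this
  rw [expA_eq_pick seq.toList h]
  simp [List.map_map]
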